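-- pv_equiv track=rewrite | github.com/shawn-rhoads/ReelMe | app.py | fix_movie_name
-- ===== SOURCE A (Python) =====
-- def fix_movie_name(name):
--     name = name.capitalize()
--     fixed = ''
--     for i in range(0, len(name)):
--         if name[i] == "-":
--             fixed = fixed + " "
--         elif name[i-1] == "-":
--             fixed = fixed + name[i].upper()
--         else:
--             fixed = fixed + name[i]
--
--     return fixed
-- ===== SOURCE B (Python) =====
-- def fix_movie_name(name):
--     parts = name.capitalize().split('-')
--     return ' '.join([parts[0]] + [p[:1].upper() + p[1:] for p in parts[1:]])
-- ===== Notes on version B (the rewrite author's own statement) =====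
-- stated objective: faster
-- what changed: Replaces the per-character index loop with quadratic string concatenation (and its name[i-1] lookback) by tokenizing once: split the capitalized name on hyphens, uppercase the first character of every segment after the first, and join with spaces.
import Mathlib
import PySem

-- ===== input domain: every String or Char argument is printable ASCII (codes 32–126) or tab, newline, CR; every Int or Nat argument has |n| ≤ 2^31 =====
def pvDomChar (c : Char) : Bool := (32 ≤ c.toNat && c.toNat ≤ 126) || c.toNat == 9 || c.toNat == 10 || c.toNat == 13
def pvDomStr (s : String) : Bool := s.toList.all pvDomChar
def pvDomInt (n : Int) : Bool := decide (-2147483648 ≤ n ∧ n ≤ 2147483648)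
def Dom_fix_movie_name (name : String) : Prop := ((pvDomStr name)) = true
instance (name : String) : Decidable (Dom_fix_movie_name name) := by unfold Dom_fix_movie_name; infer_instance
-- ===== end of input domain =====

-- B replaces A's per-character index loop (quadratic string concatenation, name[i-1] lookback)
-- by split-on-hyphen / uppercase-first-of-each-later-segment / join-with-spaces; objective: faster.

-- hand port of str.capitalize() (uppercase first char, lowercase the rest): exact on the
-- ASCII domain, where Python's titlecase of the first character IS uppercase
def pyCapitalize (s : List Char) : List Char :=
  match s with
  | [] => []
  | c :: r => PySem.Chars.upperChar c :: PySem.Chars.lower r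

-- ===== PORT A =====
-- name[i] and name[i-1] never raise here (0 ≤ i < len, so -1 ≤ i-1 < len), so pyGetD is exact
def fix_movie_name (name : String) : String :=
  let cap := pyCapitalize name.toList
  let fixed := (PySem.List.pyRange 0 (cap.length : Int) 1).foldl
    (fun fixed i =>
      if PySem.List.pyGetD cap i ' ' = '-' then fixed ++ [' ']
      else if PySem.List.pyGetD cap (i - 1) ' ' = '-' then
        fixed ++ PySem.Chars.upper [PySem.List.pyGetD cap i ' ']
      else fixed ++ [PySem.List.pyGetD cap i ' ']) []
  String.ofList fixed

-- ===== PORT B =====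
-- name.split('-') ported as Mathlib's List.splitOn '-' (exact for a non-empty separator);
-- p[:1] / p[1:] / parts[1:] are PySem slices, parts[0] never raises (split is never empty)
def fix_movie_name_alt (name : String) : String :=
  let parts := (pyCapitalize name.toList).splitOn '-'
  let pieces := PySem.List.pyGetD parts 0 [] ::
    (PySem.List.slice parts (some 1) none).map
      (fun p => PySem.Chars.upper (PySem.List.slice p none (some 1)) ++
                PySem.List.slice p (some 1) none)
  String.ofList (PySem.Chars.join [' '] pieces)

-- ===== PRECONDITION & SPEC =====
def Spec_fix_movie_name (name : String) (out : String) : Prop := out = fix_movie_name_alt name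
instance (name : String) (out : String) : Decidable (Spec_fix_movie_name name out) := by unfold Spec_fix_movie_name; infer_instance

-- ===== CLAIM (what is proved, stated in full; the proofs are below) =====
def Claim_equal_fix_movie_name : Prop := ∀ (name : String), Dom_fix_movie_name name → Spec_fix_movie_name name (fix_movie_name name)

-- ===== LEMMAS AND PROOFS =====

-- the common reference function: one pass, remembering whether the previous char was '-'
def fixRest (b : Bool) : List Char → List Char
  | [] => []
  | c :: r =>
      (if c = '-' then ' ' else if b then PySem.Chars.upperChar c else c) :: fixRest (c = '-') r

theorem upperChar_not_lower (x : Char) : PySem.Chars.islower (PySem.Chars.upperChar x) = false := by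
  simp only [PySem.Chars.upperChar, PySem.Chars.islower]
  split_ifs with h
  · simp only [Bool.and_eq_true, decide_eq_true_eq] at h
    obtain ⟨h1, h2⟩ := h
    rw [Char.le_def, UInt32.le_iff_toNat_le] at h1 h2
    have e1 : ('a').val.toNat = 97 := by decide
    have e2 : ('z').val.toNat = 122 := by decide
    have e3 : x.toNat = x.val.toNat := rfl
    have ht : (Char.ofNat (x.toNat - 32)).toNat = x.toNat - 32 := by
      rw [Char.toNat_ofNat, if_pos]; left; omega
    simp only [Bool.and_eq_false_iff, decide_eq_false_iff_not, Char.le_def, UInt32.le_iff_toNat_le]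
    left
    show ¬ (('a').val.toNat ≤ (Char.ofNat (x.toNat - 32)).val.toNat)
    have : (Char.ofNat (x.toNat - 32)).val.toNat = x.toNat - 32 := ht
    omega
  · simp only [Bool.and_eq_true, decide_eq_true_eq] at h
    simp only [Bool.and_eq_false_iff, decide_eq_false_iff_not]
    tauto

theorem upperChar_upperChar (x : Char) :
    PySem.Chars.upperChar (PySem.Chars.upperChar x) = PySem.Chars.upperChar x := by
  conv_lhs => rw [PySem.Chars.upperChar]
  rw [upperChar_not_lower]
  simp

-- the Boolean flag at the head is irrelevant on a capitalized string (its first char is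
-- already the result of upperChar)
theorem fixRest_capitalize (b : Bool) (l : List Char) :
    fixRest b (pyCapitalize l) = fixRest false (pyCapitalize l) := by
  cases l with
  | nil => rfl
  | cons c r =>
    simp only [pyCapitalize, fixRest]
    by_cases h : PySem.Chars.upperChar c = '-'
    · simp [h]
    · simp [h, upperChar_upperChar]

-- ===== A-side: the index fold computes fixRest =====

theorem foldA_eq (cap : List Char) (n : Nat) :
    ∀ (k : Nat) (acc : List Char), cap.length = k + n →
    (PySem.List.pyRange (k : Int) (cap.length : Int) 1).foldl
      (fun fixed i =>
        if PySem.List.pyGetD cap i ' ' = '-' then fixed ++ [' ']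
        else if PySem.List.pyGetD cap (i - 1) ' ' = '-' then
          fixed ++ PySem.Chars.upper [PySem.List.pyGetD cap i ' ']
        else fixed ++ [PySem.List.pyGetD cap i ' ']) acc
    = acc ++ fixRest (decide (PySem.List.pyGetD cap ((k : Int) - 1) ' ' = '-')) (cap.drop k) := by
  induction n with
  | zero =>
    intro k acc hk
    have h1 : (PySem.List.pyRange (k : Int) (cap.length : Int) 1) = [] := by
      simp [PySem.List.pyRange]; omega
    have h2 : cap.drop k = [] := by
      apply List.drop_eq_nil_of_le; omega
    simp [h1, h2, fixRest]
  | succ m ih =>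
    intro k acc hk
    have hklt : k < cap.length := by omega
    have hrange : (PySem.List.pyRange (k : Int) (cap.length : Int) 1)
        = (k : Int) :: PySem.List.pyRange ((k : Int) + 1) (cap.length : Int) 1 := by
      apply PySem.List.pyRange_one_cons; exact_mod_cast hklt
    have hget : PySem.List.pyGetD cap (k : Int) ' ' = cap[k] := by
      rw [PySem.List.pyGetD_natCast]; exact List.getD_eq_getElem cap ' ' hklt
    have hdrop : cap.drop k = cap[k] :: cap.drop (k + 1) := List.drop_eq_getElem_cons hklt
    have hcast : ((k : Int) + 1) = ((k + 1 : Nat) : Int) := by push_cast; ring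
    have ihk : (PySem.List.pyRange ((k + 1 : Nat) : Int) (cap.length : Int) 1).foldl
        (fun fixed i =>
          if PySem.List.pyGetD cap i ' ' = '-' then fixed ++ [' ']
          else if PySem.List.pyGetD cap (i - 1) ' ' = '-' then
            fixed ++ PySem.Chars.upper [PySem.List.pyGetD cap i ' ']
          else fixed ++ [PySem.List.pyGetD cap i ' ']) (acc ++
            (if cap[k] = '-' then [' ']
             else if PySem.List.pyGetD cap ((k : Int) - 1) ' ' = '-' then
               PySem.Chars.upper [cap[k]]
             else [cap[k]]))
        = (acc ++ _) ++ fixRest (decide (PySem.List.pyGetD cap (((k + 1 : Nat) : Int) - 1) ' ' = '-'))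
            (cap.drop (k + 1)) := ih (k + 1) _ (by omega)
    rw [hrange, List.foldl_cons]
    have hstep : (if PySem.List.pyGetD cap (k : Int) ' ' = '-' then acc ++ [' ']
        else if PySem.List.pyGetD cap ((k : Int) - 1) ' ' = '-' then
          acc ++ PySem.Chars.upper [PySem.List.pyGetD cap (k : Int) ' ']
        else acc ++ [PySem.List.pyGetD cap (k : Int) ' '])
        = acc ++ (if cap[k] = '-' then [' ']
             else if PySem.List.pyGetD cap ((k : Int) - 1) ' ' = '-' then
               PySem.Chars.upper [cap[k]]
             else [cap[k]]) := by
      rw [hget]; split_ifs <;> rfl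
    rw [hstep, hcast, ihk]
    have hprev : PySem.List.pyGetD cap (((k + 1 : Nat) : Int) - 1) ' ' = cap[k] := by
      have : (((k + 1 : Nat) : Int) - 1) = (k : Int) := by push_cast; ring
      rw [this, hget]
    rw [hprev, hdrop]
    simp only [fixRest, List.append_assoc]
    congr 1
    by_cases h1 : cap[k] = '-'
    · simp [h1]
    · by_cases h2 : PySem.List.pyGetD cap ((k : Int) - 1) ' ' = '-'
      · simp [h1, h2, PySem.Chars.upper]
      · simp [h1, h2]

-- ===== B-side: split / uppercase-first / join computes fixRest =====

-- p[:1].upper() + p[1:] in list form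
def upFirst (p : List Char) : List Char :=
  PySem.Chars.upper (PySem.List.slice p none (some 1)) ++ PySem.List.slice p (some 1) none

theorem upFirst_nil : upFirst [] = [] := by
  simp [upFirst, PySem.List.slice, PySem.Chars.upper]

theorem upFirst_cons (c : Char) (q : List Char) :
    upFirst (c :: q) = PySem.Chars.upperChar c :: q := by
  have h1 : PySem.List.slice (c :: q) none (some 1) = [c] := by
    simp [PySem.List.slice, PySem.List.clampIdx]
  have h2 : PySem.List.slice (c :: q) (some 1) none = q := by
    rw [PySem.List.slice_from_one]; rfl
  simp [upFirst, h1, h2, PySem.Chars.upper]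

theorem join_cons_head (c : Char) (q : List Char) (ps : List (List Char)) :
    PySem.Chars.join [' '] ((c :: q) :: ps) = c :: PySem.Chars.join [' '] (q :: ps) := by
  cases ps with
  | nil => rw [PySem.Chars.join_singleton, PySem.Chars.join_singleton]
  | cons p2 pp =>
    rw [PySem.Chars.join_cons_cons, PySem.Chars.join_cons_cons]
    simp

theorem split_fix (cs : List Char) :
    (PySem.Chars.join [' ']
      ((cs.splitOn '-').headD [] :: ((cs.splitOn '-').tail.map upFirst)) = fixRest false cs)
  ∧ (PySem.Chars.join [' '] ((cs.splitOn '-').map upFirst) = fixRest true cs) := by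
  induction cs with
  | nil =>
    constructor <;>
      simp [List.splitOn, List.splitOnP_nil, upFirst_nil, PySem.Chars.join_singleton, fixRest]
  | cons c r ih =>
    obtain ⟨ih1, ih2⟩ := ih
    obtain ⟨q, rest, hqr⟩ : ∃ q rest, r.splitOn '-' = q :: rest := by
      rcases hne : r.splitOn '-' with _ | ⟨q, rest⟩
      · exact absurd hne (List.splitOnP_ne_nil _ r)
      · exact ⟨q, rest, rfl⟩
    by_cases hc : c = '-'
    · subst hc
      have hsplit : ('-' :: r).splitOn '-' = [] :: r.splitOn '-' := by
        simp [List.splitOn, List.splitOnP_cons]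
      rw [hqr] at hsplit ih1 ih2
      simp only [List.map_cons, List.headD_cons, List.tail_cons] at ih1 ih2
      constructor
      · rw [hsplit]
        simp only [List.headD, List.tail, List.map_cons]
        rw [PySem.Chars.join_cons_cons]
        simp only [List.nil_append, List.singleton_append]
        rw [show fixRest false ('-' :: r) = ' ' :: fixRest true r by simp [fixRest]]
        rw [ih2]
      · rw [hsplit]
        simp only [List.map_cons, upFirst_nil]
        rw [PySem.Chars.join_cons_cons]
        simp only [List.nil_append, List.singleton_append]
        rw [show fixRest true ('-' :: r) = ' ' :: fixRest true r by simp [fixRest]]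
        rw [ih2]
    · have hsplit : (c :: r).splitOn '-' = (c :: q) :: rest := by
        simp only [List.splitOn, List.splitOnP_cons] at *
        rw [if_neg (by simp [hc]), hqr]
        rfl
      rw [hqr] at ih1 ih2
      simp only [List.map_cons, List.headD_cons, List.tail_cons] at ih1 ih2
      constructor
      · rw [hsplit]
        simp only [List.headD, List.tail]
        rw [join_cons_head]
        rw [show fixRest false (c :: r) = c :: fixRest false r by simp [fixRest, hc]]
        rw [ih1]
      · rw [hsplit]
        simp only [List.map_cons, upFirst_cons]
        rw [join_cons_head]
        rw [show fixRest true (c :: r) = PySem.Chars.upperChar c :: fixRest false r by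
          simp [fixRest, hc]]
        rw [ih1]

-- ===== VERDICT (by name: the statement is the Claim_ definition above) =====
theorem fix_movie_name_spec : Claim_equal_fix_movie_name := by
  intro name _
  simp only [Spec_fix_movie_name, fix_movie_name, fix_movie_name_alt]
  set cap := pyCapitalize name.toList with hcap
  -- A side
  have hA := foldA_eq cap cap.length 0 [] (by omega)
  simp only [Nat.cast_zero, List.drop_zero, List.nil_append] at hA
  rw [hA, fixRest_capitalize]
  -- B side
  obtain ⟨q, rest, hqr⟩ : ∃ q rest, cap.splitOn '-' = q :: rest := by
    rcases hne : cap.splitOn '-' with _ | ⟨q, rest⟩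
    · exact absurd hne (List.splitOnP_ne_nil _ cap)
    · exact ⟨q, rest, rfl⟩
  have hB := (split_fix cap).1
  rw [hqr] at hB ⊢
  simp only [List.headD, List.tail] at hB
  rw [PySem.List.pyGetD_zero_cons, PySem.List.slice_from_one]
  simp only [List.tail_cons]
  rw [← hB]
  rfl
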